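-- pv_equiv track=rewrite | github.com/tblock007/kattis | py/integerlists_TLE.py | solve
-- ===== SOURCE A (Python) =====
-- def printlist(l):
--     if len(l) == 0:
--         return '[]'
--     else:
--         result = '['
--         result += str(l[0])
--         for i in range(1, len(l)):
--             result += ',{0}'.format(l[i])
--         result += ']'
--         return result
--
-- def solve(p, x):
--     for c in p:
--         if c == 'R':
--             x.reverse()
--         if c == 'D':
--             if len(x) == 0:
--                 return 'error'
--             else:
--                 x = x[1:]
--
--     return printlist(x)
-- ===== SOURCE B (Python) =====
-- def solve(p, x):
--     # Two-pointer window [lo, hi) over x with a direction flag; O(1) per command.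
--     # (Does not mutate x; A reverses x in place.)
--     lo, hi = 0, len(x)
--     rev = False
--     for c in p:
--         if c == 'R':
--             rev = not rev
--         elif c == 'D':
--             if lo == hi:
--                 return 'error'
--             if rev:
--                 hi -= 1
--             else:
--                 lo += 1
--     seg = x[lo:hi]
--     if rev:
--         seg.reverse()
--     return '[' + ','.join(map(str, seg)) + ']'
-- ===== Notes on version B (the rewrite author's own statement) =====
-- stated objective: faster
-- what changed: Replaces A's in-place list reversal and re-slicing per command with a two-pointer window [lo,hi) plus a direction flag updated in O(1) per command, materialising the result once at the end.
import Mathlib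
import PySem

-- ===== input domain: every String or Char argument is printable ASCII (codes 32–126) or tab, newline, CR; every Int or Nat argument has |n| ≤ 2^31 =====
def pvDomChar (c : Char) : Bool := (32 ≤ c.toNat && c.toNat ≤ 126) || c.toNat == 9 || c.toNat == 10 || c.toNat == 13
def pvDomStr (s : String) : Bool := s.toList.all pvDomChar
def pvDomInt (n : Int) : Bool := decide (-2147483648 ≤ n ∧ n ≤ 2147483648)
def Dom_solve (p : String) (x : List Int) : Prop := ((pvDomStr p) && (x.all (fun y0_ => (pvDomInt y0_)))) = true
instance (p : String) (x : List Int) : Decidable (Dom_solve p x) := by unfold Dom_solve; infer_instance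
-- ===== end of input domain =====

-- B replaces A's per-command list reversal/slicing with an O(1)-per-command two-pointer window
-- plus a direction flag (objective: faster). Equivalence is about the RETURN value only:
-- A reverses the caller's list in place, B does not mutate it.

-- ===== PORT A =====
def printlistA (l : List Int) : String :=
  if PySem.List.len l = 0 then "[]"
  else
    -- result = '[' ; result += str(l[0]) ; for i in range(1, len(l)): result += ',{0}'.format(l[i]) ; result += ']'
    -- string concatenation carried out on the character lists (exact for Python '+')
    String.mk
      (((PySem.List.pyRange 1 (PySem.List.len l)).foldl
          (fun r i => r ++ ',' :: PySem.Int.toChars (PySem.List.pyGetD l i 0))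
          (['['] ++ PySem.Int.toChars (PySem.List.pyGetD l 0 0))) ++ [']'])

def solveLoopA : List Char → List Int → Option (List Int)
  | [], x => some x
  | c :: cs, x =>
    let x := if c = 'R' then x.reverse else x
    if c = 'D' then
      if PySem.List.len x = 0 then none          -- 'return "error"'
      else solveLoopA cs (PySem.List.slice x (some 1) none)  -- x = x[1:]
    else solveLoopA cs x

def solve (p : String) (x : List Int) : String :=
  match solveLoopA p.toList x with
  | none => "error"
  | some l => printlistA l

-- ===== PORT B =====
def solveLoopB : List Char → Nat → Nat → Bool → Option (Nat × Nat × Bool)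
  | [], lo, hi, rev => some (lo, hi, rev)
  | c :: cs, lo, hi, rev =>
    if c = 'R' then solveLoopB cs lo hi (!rev)
    else if c = 'D' then
      if lo = hi then none                       -- 'return "error"'
      else if rev then solveLoopB cs lo (hi - 1) rev
      else solveLoopB cs (lo + 1) hi rev
    else solveLoopB cs lo hi rev

def solve_alt (p : String) (x : List Int) : String :=
  match solveLoopB p.toList 0 x.length false with
  | none => "error"
  | some (lo, hi, rev) =>
    -- seg = x[lo:hi]; if rev: seg.reverse(); '[' + ','.join(map(str, seg)) + ']'
    -- (concatenation carried out on the character lists, exact for Python '+')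
    String.mk ('[' ::
      (PySem.Str.join ","
        (((if rev then (PySem.List.slice x (some (lo : Int)) (some (hi : Int))).reverse
           else PySem.List.slice x (some (lo : Int)) (some (hi : Int)))).map
          PySem.Int.toStr)).toList ++ [']'])

-- ===== PRECONDITION & SPEC =====
def Spec_solve (p : String) (x : List Int) (out : String) : Prop := out = solve_alt p x
instance (p : String) (x : List Int) (out : String) : Decidable (Spec_solve p x out) := by unfold Spec_solve; infer_instance

-- ===== CLAIM (what is proved, stated in full; the proofs are below) =====
def Claim_equal_solve : Prop := ∀ (p : String) (x : List Int), Dom_solve p x → Spec_solve p x (solve p x)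

-- ===== LEMMAS AND PROOFS =====

-- the list A's loop carries, expressed from B's window state
def view (x : List Int) (lo hi : Nat) (rev : Bool) : List Int :=
  let s := (x.drop lo).take (hi - lo)
  if rev then s.reverse else s

lemma view_false (x : List Int) (lo hi : Nat) :
    view x lo hi false = (x.drop lo).take (hi - lo) := by simp [view]

lemma view_true (x : List Int) (lo hi : Nat) :
    view x lo hi true = ((x.drop lo).take (hi - lo)).reverse := by simp [view]

lemma view_length (x : List Int) (lo hi : Nat) (rev : Bool)
    (_ : lo ≤ hi) (h2 : hi ≤ x.length) : (view x lo hi rev).length = hi - lo := by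
  unfold view
  cases rev <;> simp <;> omega

lemma dropLast_take_le {α : Type} {i : Nat} {l : List α} (h : i ≤ l.length) :
    (l.take i).dropLast = l.take (i - 1) := by
  rcases lt_or_eq_of_le h with h | h
  · exact List.dropLast_take h
  · subst h; simp [List.dropLast_eq_take]

lemma view_reverse (x : List Int) (lo hi : Nat) (rev : Bool) :
    view x lo hi (!rev) = (view x lo hi rev).reverse := by
  unfold view; cases rev <;> simp

lemma view_tail_false (x : List Int) (lo hi : Nat) (_ : lo < hi) :
    (view x lo hi false).tail = view x (lo + 1) hi false := by
  rw [view_false, view_false, ← List.drop_one, List.drop_take, List.drop_drop]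
  simp [Nat.sub_sub]

lemma view_tail_true (x : List Int) (lo hi : Nat) (h1 : lo < hi) (h2 : hi ≤ x.length) :
    (view x lo hi true).tail = view x lo (hi - 1) true := by
  rw [view_true, view_true, List.tail_reverse,
    dropLast_take_le (by simp; omega)]
  have h3 : hi - lo - 1 = hi - 1 - lo := by omega
  rw [h3]

lemma loop_agree (cs : List Char) (x : List Int) :
    ∀ (lo hi : Nat) (rev : Bool), lo ≤ hi → hi ≤ x.length →
    solveLoopA cs (view x lo hi rev) =
      (solveLoopB cs lo hi rev).map (fun s => view x s.1 s.2.1 s.2.2) := by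
  induction cs with
  | nil => intro lo hi rev _ _; simp [solveLoopA, solveLoopB]
  | cons c cs ih =>
    intro lo hi rev h1 h2
    by_cases hR : c = 'R'
    · subst hR
      simp only [solveLoopA, solveLoopB, if_neg (by decide : ¬ ('R' = 'D'))]
      rw [← view_reverse]
      exact ih lo hi (!rev) h1 h2
    · by_cases hD : c = 'D'
      · subst hD
        simp only [solveLoopA, solveLoopB, if_neg hR,
          PySem.List.len, PySem.List.slice_from_one]
        have hlen : ((view x lo hi rev).length : Int) = ((hi - lo : Nat) : Int) := by
          rw [view_length x lo hi rev h1 h2]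
        by_cases he : lo = hi
        · have hz : ((view x lo hi rev).length : Int) = 0 := by rw [hlen]; omega
          rw [if_pos hz, if_pos he]
          simp
        · have hlt : lo < hi := lt_of_le_of_ne h1 he
          have hz : ¬ ((view x lo hi rev).length : Int) = 0 := by rw [hlen]; omega
          rw [if_neg hz, if_neg he]
          cases rev with
          | false =>
            rw [view_tail_false x lo hi hlt]
            simpa using ih (lo + 1) hi false (by omega) h2
          | true =>
            rw [view_tail_true x lo hi hlt h2]
            simpa using ih lo (hi - 1) true (by omega) (by omega)
      · simp only [solveLoopA, solveLoopB, if_neg hR, if_neg hD]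
        exact ih lo hi rev h1 h2

lemma join_comma (a : Int) (t : List Int) :
    PySem.Chars.join [','] ((a :: t).map PySem.Int.toChars) =
      PySem.Int.toChars a ++ t.flatMap (fun v => ',' :: PySem.Int.toChars v) := by
  induction t generalizing a with
  | nil => simp [PySem.Chars.join_singleton]
  | cons b t ih =>
    rw [List.map_cons, List.map_cons, PySem.Chars.join_cons_cons, ← List.map_cons]
    rw [ih b]
    simp

lemma printlist_eq (l : List Int) :
    printlistA l =
      String.mk ('[' :: (PySem.Str.join "," (l.map PySem.Int.toStr)).toList ++ [']']) := by
  cases l with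
  | nil =>
    simp [printlistA, PySem.List.len, PySem.Str.toList_join, PySem.Chars.join_nil]
    decide
  | cons a t =>
    unfold printlistA
    rw [if_neg (show ¬ (PySem.List.len (a :: t) = 0) by
      rw [PySem.List.len_eq]; intro h; rw [List.length_cons] at h; omega)]
    rw [PySem.List.foldl_pyRange_pyGetD (a :: t) 0
      (fun r v => r ++ ',' :: PySem.Int.toChars v) _ (by norm_num : (0:Int) ≤ 1)]
    rw [PySem.List.foldl_append_eq_flatMap]
    rw [PySem.Str.toList_join, List.map_map]
    have hc : (String.toList ∘ PySem.Int.toStr) = PySem.Int.toChars := by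
      funext n; exact PySem.Int.toList_toStr n
    rw [hc]
    have hsep : (",").toList = [','] := by decide
    rw [hsep, join_comma]
    simp [PySem.List.pyGetD_zero_cons]

lemma view_final (x : List Int) (lo hi : Nat) (rev : Bool) :
    view x lo hi rev =
      (if rev then (PySem.List.slice x (some (lo : Int)) (some (hi : Int))).reverse
       else PySem.List.slice x (some (lo : Int)) (some (hi : Int))) := by
  unfold view
  rw [PySem.List.slice_natCast]

-- ===== VERDICT (by name: the statement is the Claim_ definition above) =====
theorem solve_spec : Claim_equal_solve := by
  intro p x _
  unfold Spec_solve solve solve_alt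
  have h0 : view x 0 x.length false = x := by
    unfold view; simp
  have := loop_agree p.toList x 0 x.length false (Nat.zero_le _) le_rfl
  rw [h0] at this
  rw [this]
  cases hB : solveLoopB p.toList 0 x.length false with
  | none => simp
  | some s =>
    obtain ⟨lo, hi, rev⟩ := s
    simp only [Option.map_some]
    rw [printlist_eq, view_final]
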